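-- pv_equiv track=rewrite | github.com/jun6292/Algorithm | 프로그래머스/0/181932. 코드 처리하기/코드 처리하기.py | solution
-- ===== SOURCE A (Python) =====
-- def solution(code):
--     answer = ''
--     mode = 0
--     for idx in range(0, len(code)):
--         if mode == 0:
--             if code[idx] != '1':
--                 if idx % 2 == 0:
--                     answer += code[idx]
--             else:
--                 mode = 1
--         else:
--             if code[idx] != '1':
--                 if idx % 2 == 1:
--                     answer += code[idx]
--             else:
--                 mode = 0
--     if len(answer) == 0:
--         answer += "EMPTY"
--     return answer
-- ===== SOURCE B (Python) =====
-- def solution(code):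
--     kept = [c for c in code if c != '1'][::2]
--     return ''.join(kept) if kept else "EMPTY"
-- ===== Notes on version B (the rewrite author's own statement) =====
-- stated objective: simpler
-- what changed: Replaced the mode-toggling state machine (append when idx%2==mode) by its closed form: drop every '1' from the string and keep the even-indexed characters of the remainder via a stride-2 slice.
import Mathlib
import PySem

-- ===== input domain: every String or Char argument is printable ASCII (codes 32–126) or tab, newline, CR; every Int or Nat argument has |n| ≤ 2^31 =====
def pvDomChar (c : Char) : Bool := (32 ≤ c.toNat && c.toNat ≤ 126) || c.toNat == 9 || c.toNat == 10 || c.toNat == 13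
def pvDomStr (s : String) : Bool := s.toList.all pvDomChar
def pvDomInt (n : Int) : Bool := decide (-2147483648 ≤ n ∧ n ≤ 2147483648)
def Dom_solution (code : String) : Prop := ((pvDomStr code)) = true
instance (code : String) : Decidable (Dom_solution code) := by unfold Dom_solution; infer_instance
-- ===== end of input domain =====

-- B replaces A's mode-toggling state machine by a filter ('1' removed) plus a stride-2
-- selection of the remaining characters (simpler; same behaviour, return value only).

-- ===== PORT A =====
-- A's for-loop over idx with state (answer, mode); ported as structural recursion
-- over the characters carrying the index and mode, branches in A's order.
def solLoop : List Char → Nat → Nat → List Char → List Char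
  | [], _, _, answer => answer
  | c :: rest, idx, mode, answer =>
    if mode = 0 then
      if c ≠ '1' then
        solLoop rest (idx + 1) mode (if idx % 2 = 0 then answer ++ [c] else answer)
      else solLoop rest (idx + 1) 1 answer
    else
      if c ≠ '1' then
        solLoop rest (idx + 1) mode (if idx % 2 = 1 then answer ++ [c] else answer)
      else solLoop rest (idx + 1) 0 answer

def solution (code : String) : String :=
  let answer := solLoop code.toList 0 0 []
  if answer.length = 0 then String.mk (answer ++ "EMPTY".toList) else String.mk answer

-- ===== PORT B =====
-- Source B's '[::2]' on the filtered list: keep-flag recursion starting at 'keep'.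
def stride2 : List Char → Bool → List Char
  | [], _ => []
  | c :: rest, b => if b then c :: stride2 rest false else stride2 rest true

def solution_alt (code : String) : String :=
  let kept := stride2 (code.toList.filter (fun c => c ≠ '1')) true
  if kept ≠ [] then String.mk kept else "EMPTY"

-- ===== PRECONDITION & SPEC =====
def Spec_solution (code : String) (out : String) : Prop := out = solution_alt code
instance (code : String) (out : String) : Decidable (Spec_solution code out) := by unfold Spec_solution; infer_instance

-- ===== CLAIM (what is proved, stated in full; the proofs are below) =====
def Claim_equal_solution : Prop := ∀ (code : String), Dom_solution code → Spec_solution code (solution code)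

-- ===== LEMMAS AND PROOFS =====

-- Invariant: the loop appends exactly the stride-2 selection of the '1'-filtered
-- suffix, where the flag 'idx % 2 = mode' says whether the next kept char is taken.
theorem solLoop_eq_stride2 (l : List Char) :
    ∀ (idx mode : Nat) (answer : List Char), mode = 0 ∨ mode = 1 →
    solLoop l idx mode answer
      = answer ++ stride2 (l.filter (fun c => c ≠ '1')) (decide (idx % 2 = mode)) := by
  induction l with
  | nil => intro idx mode answer _; simp [solLoop, stride2]
  | cons c rest ih =>
    intro idx mode answer hm
    by_cases hc : c = '1'
    · subst hc
      have hfil : (('1' : Char) :: rest).filter (fun c => c ≠ '1') =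
          rest.filter (fun c => c ≠ '1') := by simp
      rcases hm with hm | hm <;> subst hm
      · rw [show solLoop ('1' :: rest) idx 0 answer = solLoop rest (idx+1) 1 answer by
          simp [solLoop]]
        rw [ih (idx+1) 1 answer (Or.inr rfl), hfil]
        congr 2
        rcases Nat.mod_two_eq_zero_or_one idx with h | h <;>
          · have h2 : (idx+1) % 2 = (idx % 2 + 1) % 2 := by omega
            simp [h, h2]
      · rw [show solLoop ('1' :: rest) idx 1 answer = solLoop rest (idx+1) 0 answer by
          simp [solLoop]]
        rw [ih (idx+1) 0 answer (Or.inl rfl), hfil]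
        congr 2
        rcases Nat.mod_two_eq_zero_or_one idx with h | h <;>
          · have h2 : (idx+1) % 2 = (idx % 2 + 1) % 2 := by omega
            simp [h, h2]
    · have hfil : ((c : Char) :: rest).filter (fun c => c ≠ '1') =
          c :: rest.filter (fun c => c ≠ '1') := by simp [hc]
      rcases hm with hm | hm <;> subst hm <;>
        rcases Nat.mod_two_eq_zero_or_one idx with h | h
      · -- mode 0, idx even: append
        rw [show solLoop (c :: rest) idx 0 answer = solLoop rest (idx+1) 0 (answer ++ [c]) by
          simp [solLoop, hc, h]]
        rw [ih (idx+1) 0 (answer ++ [c]) (Or.inl rfl), hfil]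
        have h2 : ¬ ((idx+1) % 2 = 0) := by omega
        simp [h, h2, stride2]
      · -- mode 0, idx odd: skip
        rw [show solLoop (c :: rest) idx 0 answer = solLoop rest (idx+1) 0 answer by
          simp [solLoop, hc, h]]
        rw [ih (idx+1) 0 answer (Or.inl rfl), hfil]
        have h2 : (idx+1) % 2 = 0 := by omega
        simp [h, h2, stride2]
      · -- mode 1, idx even: skip
        rw [show solLoop (c :: rest) idx 1 answer = solLoop rest (idx+1) 1 answer by
          simp [solLoop, hc, h]]
        rw [ih (idx+1) 1 answer (Or.inr rfl), hfil]
        have h2 : (idx+1) % 2 = 1 := by omega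
        simp [h, h2, stride2]
      · -- mode 1, idx odd: append
        rw [show solLoop (c :: rest) idx 1 answer = solLoop rest (idx+1) 1 (answer ++ [c]) by
          simp [solLoop, hc, h]]
        rw [ih (idx+1) 1 (answer ++ [c]) (Or.inr rfl), hfil]
        have h2 : ¬ ((idx+1) % 2 = 1) := by omega
        simp [h, h2, stride2]

theorem solution_eq (code : String) : solution code = solution_alt code := by
  unfold solution solution_alt
  rw [solLoop_eq_stride2 code.toList 0 0 [] (Or.inl rfl)]
  simp only [List.nil_append]
  norm_num
  rcases h : stride2 (code.toList.filter (fun c => !decide (c = '1'))) true with _ | ⟨a, t⟩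
  · simp [h]; rfl
  · simp [h]

-- ===== VERDICT (by name: the statement is the Claim_ definition above) =====
theorem solution_spec : Claim_equal_solution := by
  intro code _
  unfold Spec_solution
  exact solution_eq code
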